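-- pv_equiv track=rewrite | github.com/stefanbuettner/adventofcode | 2023/14/solve.py | rotate_content_counterclockwise
-- ===== SOURCE A (Python) =====
-- def rotate_content_counterclockwise(content : list):
--     new_content = []
--     for x in reversed(range(len(content[0]))):
--         new_row = ""
--         for y in range(len(content)):
--             new_row += content[y][x]
--         new_content.append(new_row)
--     return new_content
-- ===== SOURCE B (Python) =====
-- def rotate_content_counterclockwise(content : list):
--     w = len(content[0])
--     cols = [[] for _ in range(w)]
--     for row in content:
--         for x in range(w):
--             cols[x].append(row[x])
--     return [''.join(c) for c in reversed(cols)]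
-- ===== Notes on version B (the rewrite author's own statement) =====
-- stated objective: alternative
-- what changed: A traverses column-major (outer loop over columns, re-scanning all rows once per column and concatenating a string); B makes a single row-major pass over the grid, maintaining one character buffer per column and joining/reversing the buffers at the end.
import Mathlib
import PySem

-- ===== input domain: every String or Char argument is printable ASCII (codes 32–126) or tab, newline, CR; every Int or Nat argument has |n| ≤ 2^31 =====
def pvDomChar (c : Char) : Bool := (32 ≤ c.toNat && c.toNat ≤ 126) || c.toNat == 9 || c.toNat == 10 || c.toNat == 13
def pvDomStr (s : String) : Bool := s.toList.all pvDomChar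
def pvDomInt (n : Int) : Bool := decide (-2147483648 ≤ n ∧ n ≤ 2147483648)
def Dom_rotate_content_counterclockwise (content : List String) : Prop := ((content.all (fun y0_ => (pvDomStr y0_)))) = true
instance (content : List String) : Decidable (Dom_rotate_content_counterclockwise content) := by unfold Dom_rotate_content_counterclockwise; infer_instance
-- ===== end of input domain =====

-- B replaces A's column-major nested loops (one re-scan of the rows per column) by one
-- row-major pass accumulating per-column buffers (alternative decomposition, same cost).

-- ===== PORT A =====
-- Literal port of A: outer loop over reversed(range(len(content[0]))), inner loop over
-- range(len(content)) appending content[y][x]; strings handled on the List Char side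
-- (String.ofList at the end of the inner loop), exact on the admitted inputs.
def rotate_content_counterclockwise (content : List String) : List String :=
  (List.range ((content.headD "").toList.length)).reverse.foldl
    (fun new_content x =>
      new_content ++ [String.ofList ((List.range content.length).foldl
        (fun new_row y => new_row ++ [((content.getD y "").toList.getD x ' ')]) [])])
    []

-- ===== PORT B =====
-- w = len(content[0]); cols = [[] for _ in range(w)]; one pass over the rows,
-- each row appends row[x] to buffer x; then join each buffer, in reversed order.
def rotate_content_counterclockwise_alt (content : List String) : List String :=
  (content.foldl
    (fun cols row =>
      (List.range ((content.headD "").toList.length)).map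
        (fun x => cols.getD x [] ++ [row.toList.getD x ' ']))
    ((List.range ((content.headD "").toList.length)).map (fun _ => ([] : List Char)))
  ).reverse.map (fun c => String.ofList c)

-- ===== PRECONDITION & SPEC =====
-- A raises IndexError on empty content (content[0]) and whenever some row is shorter than the
-- first row (content[y][x]); exactly those inputs are excluded (B raises there too).
def Pre_rotate_content_counterclockwise (content : List String) : Prop :=
  content ≠ [] ∧ ∀ s ∈ content, (content.headD "").toList.length ≤ s.toList.length
instance (content : List String) : Decidable (Pre_rotate_content_counterclockwise content) := by
  unfold Pre_rotate_content_counterclockwise; infer_instance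

def pvWitness_rotate_content_counterclockwise : List String := ["ab", "cd", "ef"]

def Spec_rotate_content_counterclockwise (content : List String) (out : List String) : Prop := out = rotate_content_counterclockwise_alt content
instance (content : List String) (out : List String) : Decidable (Spec_rotate_content_counterclockwise content out) := by unfold Spec_rotate_content_counterclockwise; infer_instance

-- ===== CLAIM (what is proved, stated in full; the proofs are below) =====
def Claim_equal_rotate_content_counterclockwise : Prop := ∀ (content : List String), Dom_rotate_content_counterclockwise content → Pre_rotate_content_counterclockwise content → Spec_rotate_content_counterclockwise content (rotate_content_counterclockwise content)

-- ===== LEMMAS AND PROOFS =====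

-- indexing a list by range over its length is just mapping over it
lemma pv_map_range_getD {α β : Type} (L : List α) (d : α) (f : α → β) :
    (List.range L.length).map (fun y => f (L.getD y d)) = L.map f := by
  apply List.ext_getElem
  · simp
  · intro i h1 h2
    simp [List.getD_eq_getElem?_getD, List.getElem?_eq_getElem (by simpa using h1)]

lemma pv_getD_map_range {β : Type} (w x : Nat) (g : Nat → β) (d : β) (hx : x < w) :
    ((List.range w).map g).getD x d = g x := by
  simp [List.getD_eq_getElem?_getD, hx]

-- the row-major accumulation: after folding the rows, buffer x holds g x followed by column x
lemma pv_cols_inv (w : Nat) (rows : List String) : ∀ g : Nat → List Char,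
    rows.foldl
      (fun cols row => (List.range w).map (fun x => cols.getD x [] ++ [row.toList.getD x ' ']))
      ((List.range w).map g)
    = (List.range w).map (fun x => g x ++ rows.map (fun r => r.toList.getD x ' ')) := by
  induction rows with
  | nil => intro g; simp
  | cons r rs ih =>
      intro g
      simp only [List.foldl_cons]
      have h1 : (List.range w).map
            (fun x => (((List.range w).map g).getD x []) ++ [r.toList.getD x ' '])
          = (List.range w).map (fun x => g x ++ [r.toList.getD x ' ']) := by
        apply List.map_congr_left
        intro x hx
        rw [pv_getD_map_range w x g [] (List.mem_range.mp hx)]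
      rw [h1, ih (fun x => g x ++ [r.toList.getD x ' '])]
      apply List.map_congr_left
      intro x _
      simp

lemma pv_foldl_snoc {α β : Type} (f : α → β) (l : List α) (init : List β) :
    l.foldl (fun acc x => acc ++ [f x]) init = init ++ l.map f := by
  induction l generalizing init with
  | nil => simp
  | cons a t ih => simp [ih]

-- ===== VERDICT (by name: the statement is the Claim_ definition above) =====
theorem rotate_content_counterclockwise_spec : Claim_equal_rotate_content_counterclockwise := by
  intro content _ _
  unfold Spec_rotate_content_counterclockwise
  unfold rotate_content_counterclockwise rotate_content_counterclockwise_alt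
  set w := (content.headD "").toList.length with hw
  -- B side: resolve the accumulation
  rw [pv_cols_inv w content (fun _ => ([] : List Char))]
  simp only [List.nil_append]
  -- A side: both foldl loops are snoc-maps
  rw [pv_foldl_snoc (fun x => String.ofList ((List.range content.length).foldl
        (fun new_row y => new_row ++ [((content.getD y "").toList.getD x ' ')]) []))]
  simp only [List.nil_append]
  rw [List.map_reverse, List.map_reverse, List.map_map]
  congr 1
  apply List.map_congr_left
  intro x _
  rw [pv_foldl_snoc (fun y => ((content.getD y "").toList.getD x ' ')) (List.range content.length) []]
  simp only [List.nil_append, Function.comp]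
  show String.ofList _ = String.ofList _
  apply congrArg
  exact pv_map_range_getD content "" (fun s => s.toList.getD x ' ')
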